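-- pv_equiv track=rewrite | github.com/usc-isi-i2/mowgli-in-the-jungle | mowgli/Lexicalization/Lexicalizations.py | _separate_edges
-- ===== SOURCE A (Python) =====
-- from collections import deque
-- from typing import Any, Union, Tuple, Iterable, Generator
-- from typing import List
--
-- def _separate_edges(path: Iterable[str]) -> Generator[List[str], None, None]:
--     d = deque(maxlen=3)
--     iterable = iter(path)
--     for i, it in enumerate(iterable):
--         d.append(it)
--         if len(d) == 3:
--             yield list(d)
--             d.popleft()
--             d.popleft()
-- ===== SOURCE B (Python) =====
-- def _separate_edges(path):
--     items = list(path)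
--     for i in range(0, len(items) - 2, 2):
--         yield items[i:i+3]
-- ===== Notes on version B (the rewrite author's own statement) =====
-- stated objective: simpler
-- what changed: Replaces the per-element sliding deque (append/popleft/popleft) with a materialized list traversed by start index with stride 2, yielding each triple as a direct slice items[i:i+3].
import Mathlib
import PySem

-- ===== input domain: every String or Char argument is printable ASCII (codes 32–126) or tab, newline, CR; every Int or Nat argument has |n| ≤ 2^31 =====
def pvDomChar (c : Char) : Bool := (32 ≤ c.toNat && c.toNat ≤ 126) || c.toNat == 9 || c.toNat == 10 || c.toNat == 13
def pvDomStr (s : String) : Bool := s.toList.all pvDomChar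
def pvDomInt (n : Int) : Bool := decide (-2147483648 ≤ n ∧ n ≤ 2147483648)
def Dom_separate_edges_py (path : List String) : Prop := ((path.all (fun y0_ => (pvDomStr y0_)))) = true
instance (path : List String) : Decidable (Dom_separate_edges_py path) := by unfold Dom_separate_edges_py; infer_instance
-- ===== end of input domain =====

-- B replaces A's sliding deque with stride-2 index slicing over a materialized list (objective: simpler).

-- ===== PORT A =====
-- A's loop: deque with maxlen 3; on each element append, and when the deque reaches
-- length 3, emit a copy and popleft twice.  The deque is the List `d`; popleft twice = drop 2;
-- maxlen-3 trimming on append is the `if d1.length > 3` branch (never fires, kept for fidelity).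
def sepAGo (d : List String) : List String → List (List String)
  | [] => []
  | it :: rest =>
    let d1 := d ++ [it]
    let d2 := if d1.length > 3 then d1.drop (d1.length - 3) else d1
    if d2.length = 3 then d2 :: sepAGo (d2.drop 2) rest
    else sepAGo d2 rest

def separate_edges_py (path : List String) : List (List String) :=
  sepAGo [] path

-- ===== PORT B =====
-- B: items = list(path); for i in range(0, len(items)-2, 2): yield items[i:i+3]
def separate_edges_py_alt (path : List String) : List (List String) :=
  let items := path
  (PySem.List.pyRange 0 ((items.length : Int) - 2) 2).map
    (fun i => PySem.List.slice items (some i) (some (i + 3)))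

-- ===== PRECONDITION & SPEC =====
def Spec_separate_edges_py (path : List String) (out : List (List String)) : Prop := out = separate_edges_py_alt path
instance (path : List String) (out : List (List String)) : Decidable (Spec_separate_edges_py path out) := by unfold Spec_separate_edges_py; infer_instance

-- ===== CLAIM (what is proved, stated in full; the proofs are below) =====
def Claim_equal_separate_edges_py : Prop := ∀ (path : List String), Dom_separate_edges_py path → Spec_separate_edges_py path (separate_edges_py path)

-- ===== LEMMAS AND PROOFS =====

-- clean common form: the list of overlapping triples at even start indices
def triples : List String → List (List String)
  | x :: y :: z :: rest => [x, y, z] :: triples (z :: rest)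
  | _ => []
termination_by xs => xs.length

-- B in normalized form
lemma alt_norm (xs : List String) :
    separate_edges_py_alt xs
      = (List.range ((xs.length - 1) / 2)).map (fun k => (xs.drop (2 * k)).take 3) := by
  have hdef : separate_edges_py_alt xs
      = (PySem.List.pyRange 0 ((xs.length : Int) - 2) 2).map
          (fun i => PySem.List.slice xs (some i) (some (i + 3))) := rfl
  rw [hdef]
  rw [PySem.List.pyRange_of_pos 0 ((xs.length : Int) - 2) (by norm_num)]
  rw [List.map_map]
  have hcnt : (if (0 : Int) < (xs.length : Int) - 2 then
      (((xs.length : Int) - 2 - 0 + 2 - 1) / 2).toNat else 0) = (xs.length - 1) / 2 := by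
    split <;> omega
  rw [hcnt]
  apply List.map_congr_left
  intro k _
  simp only [Function.comp_apply]
  rw [PySem.List.slice_toNat xs (a := 0 + 2 * (k : Int)) (b := 0 + 2 * (k : Int) + 3)
        (by omega) (by omega)]
  have h1 : (0 + 2 * (k : Int)).toNat = 2 * k := by omega
  rw [h1]
  have h2 : (0 + 2 * (k : Int) + 3).toNat - 2 * k = 3 := by omega
  rw [h2]

lemma norm_eq_triples : ∀ (n : Nat) (xs : List String), xs.length ≤ n →
    (List.range ((xs.length - 1) / 2)).map (fun k => (xs.drop (2 * k)).take 3) = triples xs := by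
  intro n
  induction n with
  | zero =>
    intro xs h
    have : xs = [] := List.eq_nil_of_length_eq_zero (by omega)
    subst this; simp [triples]
  | succ n ih =>
    intro xs h
    match xs with
    | [] => simp [triples]
    | [x] => simp [triples]
    | [x, y] => simp [triples]
    | x :: y :: z :: rest =>
      have hlen : (x :: y :: z :: rest).length = rest.length + 3 := by simp
      have hc : ((x :: y :: z :: rest).length - 1) / 2 = rest.length / 2 + 1 := by
        rw [hlen]; omega
      rw [hc, List.range_succ_eq_map, List.map_cons, List.map_map]
      have h0 : ((x :: y :: z :: rest).drop (2 * 0)).take 3 = [x, y, z] := by simp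
      rw [h0]
      have hrec := ih (z :: rest) (by simp at h ⊢; omega)
      have hc' : ((z :: rest).length - 1) / 2 = rest.length / 2 := by
        simp only [List.length_cons]; omega
      rw [hc'] at hrec
      rw [show triples (x :: y :: z :: rest) = [x, y, z] :: triples (z :: rest) by
        simp [triples]]
      rw [← hrec]
      have hfun : ((fun k => ((x :: y :: z :: rest).drop (2 * k)).take 3) ∘ (fun i => i + 1))
          = fun k => ((z :: rest).drop (2 * k)).take 3 := by
        funext k
        simp only [Function.comp_apply]
        have h21 : 2 * (k + 1) = (2 * k + 1) + 1 := by omega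
        rw [h21]
        simp [List.drop_succ_cons]
      rw [hfun]

lemma sepA_eq_triples : ∀ (n : Nat) (xs : List String), xs.length ≤ n →
    sepAGo [] xs = triples xs := by
  intro n
  induction n with
  | zero =>
    intro xs h
    have : xs = [] := List.eq_nil_of_length_eq_zero (by omega)
    subst this; simp [sepAGo, triples]
  | succ n ih =>
    intro xs h
    match xs with
    | [] => simp [sepAGo, triples]
    | [x] => simp [sepAGo, triples]
    | [x, y] => simp [sepAGo, triples]
    | x :: y :: z :: rest =>
      have hstep : sepAGo [] (x :: y :: z :: rest) = [x, y, z] :: sepAGo [z] rest := by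
        simp [sepAGo]
      have hback : sepAGo [z] rest = sepAGo [] (z :: rest) := by
        simp [sepAGo]
      rw [hstep, hback, ih (z :: rest) (by simp at h ⊢; omega)]
      simp [triples]

-- ===== VERDICT (by name: the statement is the Claim_ definition above) =====
theorem separate_edges_py_spec : Claim_equal_separate_edges_py := by
  intro path _
  unfold Spec_separate_edges_py separate_edges_py
  rw [alt_norm, norm_eq_triples path.length path (le_refl _),
      sepA_eq_triples path.length path (le_refl _)]
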